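-- pv_equiv track=rewrite | github.com/lxy1492/SportsPrescription | Prescription/ItemCF/quantization.py | getQuantization
-- ===== SOURCE A (Python) =====
-- def initQuantization(num:int)->list:
--     l = []
--     for i in range(num):
--         l.append(0)
--     return l
--
-- def getQuantization(property:list,all:list):
--     if isinstance(property,list) and isinstance(all,list):
--         length = len(property)
--         if length<=len(all):
--             quantization = initQuantization(len(all))
--             if isinstance(quantization,list):
--                 for i in range(len(quantization)):
--                     if all[i] in property:
--                         quantization[i]=1
--                     else:
--                         quantization[i]=0
--                 return quantization
--     return None
-- ===== SOURCE B (Python) =====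
-- def getQuantization(property: list, all: list):
--     if isinstance(property, list) and isinstance(all, list) and len(property) <= len(all):
--         index = {}
--         for i, v in enumerate(all):
--             index[v] = index.get(v, []) + [i]
--         quantization = [0] * len(all)
--         for p in property:
--             for i in index.get(p, []):
--                 quantization[i] = 1
--         return quantization
--     return None
-- ===== Notes on version B (the rewrite author's own statement) =====
-- stated objective: faster
-- what changed: Instead of scanning all and probing list membership 'all[i] in property' for every index (a quadratic nested scan), B builds an inverted index (value -> list of indices in all) in one pass, starts from a zero vector, and walks over property setting 1 at each indexed position.
import Mathlib
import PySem

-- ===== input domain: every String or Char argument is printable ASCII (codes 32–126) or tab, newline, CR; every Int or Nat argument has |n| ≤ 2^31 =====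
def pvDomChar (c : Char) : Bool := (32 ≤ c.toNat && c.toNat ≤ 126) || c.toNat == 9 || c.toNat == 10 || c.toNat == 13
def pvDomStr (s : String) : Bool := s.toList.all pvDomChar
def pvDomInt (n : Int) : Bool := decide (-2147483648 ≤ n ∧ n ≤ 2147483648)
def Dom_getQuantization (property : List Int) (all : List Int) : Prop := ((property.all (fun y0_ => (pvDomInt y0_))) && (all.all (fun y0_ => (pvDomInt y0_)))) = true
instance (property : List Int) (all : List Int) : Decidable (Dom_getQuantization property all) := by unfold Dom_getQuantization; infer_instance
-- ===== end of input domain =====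

-- B replaces A's per-index membership scan of `property` by an inverted index (value → indices in `all`)
-- built in one pass, then marks 1s while walking `property` (alternative data structure / traversal).

-- ===== PORT A =====
def initQuantization (num : Int) : List Int :=
  (PySem.List.pyRange 0 num 1).foldl (fun l _ => l ++ [(0 : Int)]) []

def getQuantization (property : List Int) (all : List Int) : Option (List Int) :=
  let length : Int := property.length
  if length ≤ (all.length : Int) then
    let quantization := initQuantization (all.length : Int)
    some ((PySem.List.pyRange 0 (quantization.length : Int) 1).foldl
      (fun q i =>
        if property.contains (PySem.List.pyGetD all i 0) then PySem.List.pySetD q i 1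
        else PySem.List.pySetD q i 0) quantization)
  else none

-- ===== PORT B =====
def buildIndex (all : List Int) : PySem.Dict Int (List Int) :=
  (PySem.List.enumerate all 0).foldl
    (fun d p => d.modify p.2 [] (fun l => l ++ [p.1])) PySem.Dict.empty

def getQuantization_alt (property : List Int) (all : List Int) : Option (List Int) :=
  if (property.length : Int) ≤ (all.length : Int) then
    let idx := buildIndex all
    let q0 := PySem.List.pyRepeat [(0 : Int)] (all.length : Int)
    some (property.foldl
      (fun q p => (idx.getD p []).foldl (fun q i => PySem.List.pySetD q i 1) q) q0)
  else none

-- ===== PRECONDITION & SPEC =====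
def Spec_getQuantization (property : List Int) (all : List Int) (out : Option (List Int)) : Prop := out = getQuantization_alt property all
instance (property : List Int) (all : List Int) (out : Option (List Int)) : Decidable (Spec_getQuantization property all out) := by unfold Spec_getQuantization; infer_instance

-- ===== CLAIM (what is proved, stated in full; the proofs are below) =====
def Claim_equal_getQuantization : Prop := ∀ (property : List Int) (all : List Int), Dom_getQuantization property all → Spec_getQuantization property all (getQuantization property all)

-- ===== LEMMAS AND PROOFS =====

-- the indicator both programs compute
def pvInd (property : List Int) (x : Int) : Int := if property.contains x then 1 else 0

-- ---- A side ----
lemma initQ_aux {α : Type} (L : List α) : ∀ (l : List Int),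
    L.foldl (fun l _ => l ++ [(0 : Int)]) l = l ++ List.replicate L.length 0 := by
  induction L with
  | nil => simp
  | cons a L ih => intro l; simp [List.foldl_cons, ih, List.replicate_succ]

lemma initQ_eq (n : Nat) : initQuantization (n : Int) = List.replicate n 0 := by
  unfold initQuantization
  rw [initQ_aux]
  simp [PySem.List.length_pyRange_one]

lemma lemA_loop (property all : List Int) : ∀ (m k : Nat) (q : List Int),
    all.length - k = m → q.length = all.length →
    (PySem.List.pyRange (k : Int) (all.length : Int) 1).foldl
      (fun q i =>
        if property.contains (PySem.List.pyGetD all i 0) then PySem.List.pySetD q i 1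
        else PySem.List.pySetD q i 0) q
      = q.take k ++ (all.drop k).map (pvInd property) := by
  intro m
  induction m with
  | zero =>
    intro k q hm hq
    have hk : all.length ≤ k := by omega
    rw [PySem.List.pyRange_one_eq_nil (by exact_mod_cast hk)]
    simp [List.drop_eq_nil_of_le hk, List.take_of_length_le (le_trans (le_of_eq hq) hk)]
  | succ m ih =>
    intro k q hm hq
    have hk : k < all.length := by omega
    rw [PySem.List.pyRange_one_cons (by exact_mod_cast hk)]
    simp only [List.foldl_cons]
    have hget : PySem.List.pyGetD all (k : Int) 0 = all[k] := by
      simp [PySem.List.pyGetD_natCast, hk]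
    have hset : (if property.contains (PySem.List.pyGetD all (k : Int) 0)
        then PySem.List.pySetD q (k : Int) 1 else PySem.List.pySetD q (k : Int) 0)
        = q.set k (pvInd property all[k]) := by
      rw [hget]; unfold pvInd
      split <;> simp [PySem.List.pySetD_natCast]
    rw [hset]
    have hcast : ((k : Int) + 1) = ((k + 1 : Nat) : Int) := by push_cast; ring
    rw [hcast, ih (k + 1) (q.set k (pvInd property all[k])) (by omega) (by simp [hq])]
    have hqk : k < q.length := by omega
    rw [List.set_eq_take_append_cons_drop, if_pos hqk]
    have hdrop : all.drop k = all[k] :: all.drop (k + 1) := by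
      rw [List.drop_eq_getElem_cons hk]
    rw [hdrop]
    have hlq : (q.take k).length = k := by simp [Nat.min_eq_left (le_of_lt hqk)]
    have htake : ((q.take k ++ pvInd property all[k] :: q.drop (k + 1)).take (k + 1))
        = q.take k ++ [pvInd property all[k]] := by
      simp [List.take_append, hlq]
    rw [htake, List.map_cons]
    simp

lemma A_val (property all : List Int) (h : (property.length : Int) ≤ (all.length : Int)) :
    getQuantization property all = some (all.map (pvInd property)) := by
  unfold getQuantization
  simp only [h, if_pos]
  congr 1
  have hinit : initQuantization (all.length : Int) = List.replicate all.length 0 :=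
    initQ_eq all.length
  rw [hinit]
  have hlen : ((List.replicate all.length (0 : Int)).length : Int) = (all.length : Int) := by simp
  rw [hlen]
  have := lemA_loop property all all.length 0 (List.replicate all.length 0) (by omega) (by simp)
  simpa using this

-- ---- B side ----
lemma buildIndex_getD (all : List Int) (v : Int) :
    (buildIndex all).getD v []
      = ((((PySem.List.enumerate all 0).map Prod.swap).filter (fun p => p.1 == v)).map (·.2)) := by
  unfold buildIndex
  rw [show ((PySem.List.enumerate all 0).foldl
      (fun d p => d.modify p.2 [] (fun l => l ++ [p.1])) PySem.Dict.empty)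
      = (((PySem.List.enumerate all 0).map Prod.swap).foldl
      (fun d p => d.modify p.1 [] (fun l => l ++ [p.2])) PySem.Dict.empty) from by
    rw [List.foldl_map]; simp [Prod.swap]]
  rw [PySem.Dict.getD_foldl_modify_append]
  simp

lemma buildIndex_mem (all : List Int) (v x : Int) :
    x ∈ (buildIndex all).getD v [] ↔
      ∃ (k : Nat), ∃ (_ : k < all.length), x = (k : Int) ∧ all[k] = v := by
  rw [buildIndex_getD]
  constructor
  · intro h
    rw [List.mem_map] at h
    obtain ⟨p, hp, hx⟩ := h
    rw [List.mem_filter] at hp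
    obtain ⟨hpm, hpv⟩ := hp
    rw [List.mem_map] at hpm
    obtain ⟨q, hq, hqp⟩ := hpm
    rw [PySem.List.mem_enumerate_iff] at hq
    obtain ⟨k, hk, hqe⟩ := hq
    subst hqe; subst hqp
    exact ⟨k, hk, by simpa using hx.symm, by simpa using hpv⟩
  · rintro ⟨k, hk, hx, hv⟩
    rw [List.mem_map]
    refine ⟨((0 : Int) + (k : Int), all[k]).swap, ?_, ?_⟩
    · rw [List.mem_filter]
      refine ⟨List.mem_map.2 ⟨((0 : Int) + (k : Int), all[k]),
        (PySem.List.mem_enumerate_iff _ _ _).2 ⟨k, hk, rfl⟩, rfl⟩, ?_⟩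
      simp [hv]
    · simp [hx]

lemma inner_len (L : List Int) : ∀ (q : List Int),
    (L.foldl (fun q i => PySem.List.pySetD q i 1) q).length = q.length := by
  induction L with
  | nil => simp
  | cons i L ih => intro q; simp [List.foldl_cons, ih, PySem.List.length_pySetD]

lemma inner_get (L : List Int)
    (hL : ∀ x ∈ L, ∃ k : Nat, x = (k : Int)) :
    ∀ (q : List Int) (j : Nat), j < q.length →
    (L.foldl (fun q i => PySem.List.pySetD q i 1) q)[j]?
      = if (j : Int) ∈ L then some 1 else q[j]? := by
  induction L with
  | nil => intro q j hj; simp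
  | cons i L ih =>
    intro q j hj
    obtain ⟨k, hk⟩ := hL i (List.mem_cons_self)
    simp only [List.foldl_cons]
    have hlen : (PySem.List.pySetD q i 1).length = q.length := PySem.List.length_pySetD _ _ _
    rw [ih (fun x hx => hL x (List.mem_cons_of_mem _ hx)) _ j (by omega)]
    subst hk
    rw [PySem.List.pySetD_natCast]
    by_cases hmem : (j : Int) ∈ L
    · simp [hmem]
    · by_cases hij : k = j
      · subst hij
        simp [hmem, hj]
      · have : ¬ ((j : Int) = (k : Int)) := by exact_mod_cast Ne.symm hij
        simp [hmem, hij, this]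

lemma outer_len (all : List Int) (P : List Int) : ∀ (q : List Int),
    (P.foldl (fun q p => ((buildIndex all).getD p []).foldl
        (fun q i => PySem.List.pySetD q i 1) q) q).length = q.length := by
  induction P with
  | nil => simp
  | cons p P ih => intro q; simp [List.foldl_cons, ih, inner_len]

lemma outer_get (all : List Int) (P : List Int) : ∀ (q : List Int),
    q.length = all.length → ∀ (j : Nat) (hj : j < all.length),
    (P.foldl (fun q p => ((buildIndex all).getD p []).foldl
        (fun q i => PySem.List.pySetD q i 1) q) q)[j]?
      = if P.contains all[j] then some 1 else q[j]? := by
  induction P with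
  | nil => intro q hq j hj; simp
  | cons p P ih =>
    intro q hq j hj
    simp only [List.foldl_cons]
    have hinlen : (((buildIndex all).getD p []).foldl
        (fun q i => PySem.List.pySetD q i 1) q).length = q.length := inner_len _ _
    rw [ih _ (by omega) j hj]
    have hL : ∀ x ∈ (buildIndex all).getD p [], ∃ k : Nat, x = (k : Int) := by
      intro x hx
      obtain ⟨k, _, hxk, _⟩ := (buildIndex_mem all p x).1 hx
      exact ⟨k, hxk⟩
    rw [inner_get _ hL q j (by omega)]
    have hjmem : ((j : Int) ∈ (buildIndex all).getD p []) ↔ all[j] = p := by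
      rw [buildIndex_mem]
      constructor
      · rintro ⟨k, hk, hjk, hv⟩
        have : j = k := by exact_mod_cast hjk
        subst this; exact hv
      · intro h; exact ⟨j, hj, rfl, h⟩
    by_cases hc : all[j] = p
    · simp [hc, hjmem]
    · have hnm : ¬ ((j : Int) ∈ (buildIndex all).getD p []) := by rw [hjmem]; exact hc
      simp [hnm, hc]

lemma B_val (property all : List Int) (h : (property.length : Int) ≤ (all.length : Int)) :
    getQuantization_alt property all = some (all.map (pvInd property)) := by
  unfold getQuantization_alt
  simp only [h, if_pos]
  congr 1
  have hrep : PySem.List.pyRepeat [(0 : Int)] (all.length : Int) = List.replicate all.length 0 := by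
    rw [PySem.List.pyRepeat_singleton]; simp
  rw [hrep]
  apply List.ext_getElem?
  intro j
  by_cases hj : j < all.length
  · rw [outer_get all property (List.replicate all.length 0) (by simp) j hj]
    unfold pvInd
    by_cases hc : all[j] ∈ property
    · simp [hc, hj]
    · simp [hc, hj]
  · have h1 : (property.foldl (fun q p => ((buildIndex all).getD p []).foldl
        (fun q i => PySem.List.pySetD q i 1) q) (List.replicate all.length (0 : Int))).length
        = all.length := (outer_len all property (List.replicate all.length 0)).trans (by simp)
    rw [List.getElem?_eq_none (by omega), List.getElem?_eq_none (by simp; omega)]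

-- ===== VERDICT (by name: the statement is the Claim_ definition above) =====
theorem getQuantization_spec : Claim_equal_getQuantization := by
  intro property all _
  unfold Spec_getQuantization
  by_cases h : (property.length : Int) ≤ (all.length : Int)
  · rw [A_val property all h, B_val property all h]
  · unfold getQuantization getQuantization_alt
    simp only [h, if_false]
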